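-- pv_equiv track=rewrite | github.com/TruongHuynhTrungNghia/AnnieLearnPython | ontap3_bai8.py | count
-- ===== SOURCE A (Python) =====
-- def count(item):  # 3n+2 -> O(n)
--     sequence = 0
--     sequenceMax = 0
--     for i in item:  # n+1
--         if i >= 0:
--             sequence += 1
--         else:
--             if sequence > sequenceMax:  # 2n
--                 sequenceMax = sequence
--             sequence = 0
--     if sequence > sequenceMax:  # 1
--         sequenceMax = sequence
--     return sequenceMax
-- ===== SOURCE B (Python) =====
-- def count(item):
--     neg = [i for i, x in enumerate(item) if x < 0]
--     bounds = [-1] + neg + [len(item)]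
--     return max(b - a - 1 for a, b in zip(bounds, bounds[1:]))
-- ===== Notes on version B (the rewrite author's own statement) =====
-- stated objective: alternative
-- what changed: B replaces the running counter with manual reset by a build-then-reduce pipeline: it collects the positions of the negative elements, brackets them with -1 and len(item), and returns the maximum gap between consecutive negative positions minus one.
import Mathlib
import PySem

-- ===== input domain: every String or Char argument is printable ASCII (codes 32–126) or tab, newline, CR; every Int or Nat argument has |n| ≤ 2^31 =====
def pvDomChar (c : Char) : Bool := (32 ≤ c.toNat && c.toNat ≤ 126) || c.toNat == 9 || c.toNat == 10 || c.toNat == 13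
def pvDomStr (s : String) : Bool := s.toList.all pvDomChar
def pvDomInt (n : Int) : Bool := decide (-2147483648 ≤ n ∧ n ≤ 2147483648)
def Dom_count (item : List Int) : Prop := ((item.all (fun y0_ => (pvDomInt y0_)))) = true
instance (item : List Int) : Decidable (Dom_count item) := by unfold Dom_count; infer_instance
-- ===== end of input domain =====

-- B replaces the running counter with manual reset by a build-then-reduce pipeline over the
-- positions of the negative elements (max gap between consecutive negatives); same O(n) cost.

-- ===== PORT A =====
def count (item : List Int) : Int :=
  let p := item.foldl
    (fun (st : Int × Int) i =>
      if i ≥ 0 then (st.1 + 1, st.2)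
      else (0, if st.1 > st.2 then st.1 else st.2))
    (0, 0)
  if p.1 > p.2 then p.1 else p.2

-- ===== PORT B =====
def count_alt (item : List Int) : Int :=
  let neg : List Int :=
    ((PySem.List.enumerate item 0).filter (fun p => decide (p.2 < 0))).map (fun p => p.1)
  let bounds : List Int := -1 :: (neg ++ [(item.length : Int)])
  let gaps : List Int := (bounds.zip bounds.tail).map (fun p => p.2 - p.1 - 1)
  match gaps with
  | [] => 0          -- unreachable: bounds always has at least two elements
  | g :: gs => gs.foldl max g

-- ===== PRECONDITION & SPEC =====
def Spec_count (item : List Int) (out : Int) : Prop := out = count_alt item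
instance (item : List Int) (out : Int) : Decidable (Spec_count item out) := by unfold Spec_count; infer_instance

-- ===== CLAIM (what is proved, stated in full; the proofs are below) =====
def Claim_equal_count : Prop := ∀ (item : List Int), Dom_count item → Spec_count item (count item)

-- ===== LEMMAS AND PROOFS =====

-- reference gap list: lengths of maximal nonnegative runs, head = first run (possibly 0), in order
def gapsR : List Int → List Int
  | [] => [0]
  | x :: xs =>
    if x < 0 then 0 :: gapsR xs
    else match gapsR xs with
      | [] => [0]            -- unreachable
      | h :: t => (h + 1) :: t

def consAdd (d : Int) : List Int → List Int
  | [] => []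
  | h :: t => (h + d) :: t

def gapsOf (bounds : List Int) : List Int := (bounds.zip bounds.tail).map (fun p => p.2 - p.1 - 1)

def negsFrom (s : Int) (xs : List Int) : List Int :=
  ((PySem.List.enumerate xs s).filter (fun p => decide (p.2 < 0))).map (fun p => p.1)

theorem gapsR_ne_nil (xs : List Int) : gapsR xs ≠ [] := by
  induction xs with
  | nil => simp [gapsR]
  | cons x xs ih =>
    simp only [gapsR]
    split
    · simp
    · cases h : gapsR xs with
      | nil => simp
      | cons h t => simp

theorem gapsR_nonneg (xs : List Int) : ∀ g ∈ gapsR xs, 0 ≤ g := by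
  induction xs with
  | nil => simp [gapsR]
  | cons x xs ih =>
    simp only [gapsR]
    split
    · intro g hg
      rcases List.mem_cons.1 hg with h | h
      · omega
      · exact ih g h
    · cases h : gapsR xs with
      | nil => simp
      | cons a t =>
        intro g hg
        rcases List.mem_cons.1 hg with h' | h'
        · have := ih a (by simp [h])
          omega
        · exact ih g (by simp [h, h'])

theorem negsFrom_cons (s : Int) (x : Int) (xs : List Int) :
    negsFrom s (x :: xs) = (if x < 0 then [s] else []) ++ negsFrom (s + 1) xs := by
  simp only [negsFrom, PySem.List.enumerate_cons, List.filter_cons]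
  split <;> simp_all

theorem gapsOf_cons₂ (a b : Int) (rest : List Int) :
    gapsOf (a :: b :: rest) = (b - a - 1) :: gapsOf (b :: rest) := by
  simp [gapsOf]

-- the crux on the B side: the gap list of the bracketed negative positions is gapsR, head-shifted
theorem gapsOf_negsFrom (xs : List Int) : ∀ (s b : Int),
    gapsOf (b :: (negsFrom s xs ++ [s + xs.length])) = consAdd (s - b - 1) (gapsR xs) := by
  induction xs with
  | nil => intro s b; simp [negsFrom, PySem.List.enumerate, gapsOf, gapsR, consAdd]
  | cons x xs ih =>
    intro s b
    rw [negsFrom_cons]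
    by_cases hx : x < 0
    · simp only [if_pos hx, List.cons_append]
      have : (s : Int) + (x :: xs).length = (s + 1) + xs.length := by
        simp; omega
      rw [this, List.nil_append, gapsOf_cons₂, ih (s + 1) s]
      simp only [gapsR, if_pos hx]
      cases h : gapsR xs with
      | nil => exact absurd h (gapsR_ne_nil xs)
      | cons h t => simp [consAdd]
    · simp only [if_neg hx, List.nil_append]
      have : (s : Int) + (x :: xs).length = (s + 1) + xs.length := by
        simp; omega
      rw [this, ih (s + 1) b]
      simp only [gapsR, if_neg hx]
      cases h : gapsR xs with
      | nil => exact absurd h (gapsR_ne_nil xs)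
      | cons h t => simp [consAdd]; omega

theorem foldl_max_max (l : List Int) : ∀ (a b : Int),
    l.foldl max (max a b) = max a (l.foldl max b) := by
  induction l with
  | nil => intro a b; simp
  | cons x l ih =>
    intro a b
    simp only [List.foldl_cons]
    rw [max_assoc, ih]

def maxFold : List Int → Int
  | [] => 0
  | g :: gs => gs.foldl max g

def stepA (st : Int × Int) (i : Int) : Int × Int :=
  if i ≥ 0 then (st.1 + 1, st.2) else (0, if st.1 > st.2 then st.1 else st.2)

def finA (p : Int × Int) : Int := if p.1 > p.2 then p.1 else p.2

-- the crux on the A side: A's loop state, finished off, is the head-shifted max of gapsR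
theorem countA_loop (xs : List Int) : ∀ (seq mx : Int),
    finA (xs.foldl stepA (seq, mx)) = max mx (maxFold (consAdd seq (gapsR xs))) := by
  induction xs with
  | nil =>
    intro seq mx
    simp only [List.foldl_nil, gapsR, consAdd, maxFold, finA]
    by_cases h : seq > mx <;> simp [h] <;> omega
  | cons x xs ih =>
    intro seq mx
    simp only [List.foldl_cons]
    by_cases hx : x ≥ 0
    · rw [show stepA (seq, mx) x = (seq + 1, mx) by simp [stepA, hx], ih (seq + 1) mx]
      have hx' : ¬ x < 0 := by omega
      simp only [gapsR, if_neg hx']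
      cases h : gapsR xs with
      | nil => exact absurd h (gapsR_ne_nil xs)
      | cons g t =>
        simp only [consAdd, maxFold]
        ring_nf
    · rw [show stepA (seq, mx) x = (0, if seq > mx then seq else mx) by simp [stepA, hx],
        ih 0 (if seq > mx then seq else mx)]
      have hx' : x < 0 := by omega
      simp only [gapsR, if_pos hx']
      cases h : gapsR xs with
      | nil => exact absurd h (gapsR_ne_nil xs)
      | cons g t =>
        simp only [consAdd, maxFold, List.foldl_cons, zero_add, add_zero]
        have h1 : (if seq > mx then seq else mx) = max mx seq := by
          by_cases hc : seq > mx <;> simp [hc] <;> omega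
        rw [h1, foldl_max_max t seq g, max_assoc]

theorem maxFold_gapsR_nonneg (xs : List Int) : 0 ≤ maxFold (gapsR xs) := by
  cases h : gapsR xs with
  | nil => exact absurd h (gapsR_ne_nil xs)
  | cons g gs =>
    have hall : ∀ y ∈ g :: gs, 0 ≤ y := by
      intro y hy; exact gapsR_nonneg xs y (h ▸ hy)
    simp only [maxFold]
    have : ∀ (l : List Int) (a : Int), 0 ≤ a → (∀ y ∈ l, 0 ≤ y) → 0 ≤ l.foldl max a := by
      intro l
      induction l with
      | nil => intro a ha _; simpa using ha
      | cons z l ihl =>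
        intro a ha hl
        simp only [List.foldl_cons]
        exact ihl (max a z) (le_max_of_le_left ha) (fun y hy => hl y (List.mem_cons_of_mem _ hy))
    exact this gs g (hall g (by simp)) (fun y hy => hall y (List.mem_cons_of_mem _ hy))

theorem count_eq (item : List Int) : count item = count_alt item := by
  have key : ∀ (l : List Int), maxFold l = (match l with | [] => (0 : Int) | g :: gs => gs.foldl max g) := by
    intro l; cases l <;> rfl
  calc count item = finA (item.foldl stepA (0, 0)) := rfl
    _ = max 0 (maxFold (consAdd 0 (gapsR item))) := countA_loop item 0 0
    _ = maxFold (gapsR item) := by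
        have h0 : consAdd 0 (gapsR item) = gapsR item := by
          cases h : gapsR item <;> simp [consAdd]
        rw [h0]
        have := maxFold_gapsR_nonneg item
        omega
    _ = maxFold (gapsOf (-1 :: (negsFrom 0 item ++ [(item.length : Int)]))) := by
        have hg := gapsOf_negsFrom item 0 (-1)
        rw [show (0 : Int) + (item.length : Int) = (item.length : Int) by omega] at hg
        rw [hg]
        cases h : gapsR item with
        | nil => rfl
        | cons g gs => simp [consAdd]
    _ = count_alt item := by rw [key]; rfl

-- ===== VERDICT (by name: the statement is the Claim_ definition above) =====
theorem count_spec : Claim_equal_count := by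
  intro item _
  unfold Spec_count
  exact count_eq item
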